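-- pv_equiv track=rewrite | github.com/thealper2/codewars-solutions | 7-kyu/commenting_made_easy_a_beginners_task.py | comment
-- ===== SOURCE A (Python) =====
-- def comment(text, language):
--     lines = text.split('\n')
--     formatted_lines = []
--
--     if language == 'Bash':
--         prefix = '# '
--         formatted_lines = [prefix + line for line in lines]
--     elif language == 'Bash Multiline':
--         formatted_lines = [': "'] + lines + ['"']
--     elif language == 'Python':
--         prefix = '# '
--         formatted_lines = [prefix + line for line in lines]
--     elif language == 'Python Multiline':
--         formatted_lines = ['"""'] + lines + ['"""']
--     elif language == 'Javascript':
--         prefix = '// '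
--         formatted_lines = [prefix + line for line in lines]
--     elif language == 'Javascript Multiline':
--         formatted_lines = ['/*'] + lines + ['*/']
--     elif language == 'SQL':
--         prefix = '-- '
--         formatted_lines = [prefix + line for line in lines]
--     elif language == 'JavaDoc':
--         formatted_lines = ['/**'] + ['* ' + line for line in lines] + ['*/']
--     elif language == 'SGML':
--         formatted_lines = ['<!-- ' + line + ' -->' for line in lines]
--
--     return '\n'.join(formatted_lines)
-- ===== SOURCE B (Python) =====
-- TEMPLATES = {
--     'Bash': ('# ', '\n# ', ''),
--     'Python': ('# ', '\n# ', ''),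
--     'Javascript': ('// ', '\n// ', ''),
--     'SQL': ('-- ', '\n-- ', ''),
--     'Bash Multiline': (': "\n', '\n', '\n"'),
--     'Python Multiline': ('"""\n', '\n', '\n"""'),
--     'Javascript Multiline': ('/*\n', '\n', '\n*/'),
--     'JavaDoc': ('/**\n* ', '\n* ', '\n*/'),
--     'SGML': ('<!-- ', ' -->\n<!-- ', ' -->'),
-- }
--
-- def comment(text, language):
--     if language not in TEMPLATES:
--         return ''
--     head, sep, tail = TEMPLATES[language]
--     return head + text.replace('\n', sep) + tail
-- ===== Notes on version B (the rewrite author's own statement) =====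
-- stated objective: alternative
-- what changed: B never splits the text into lines: each language is a (head, sep, tail) template and the answer is the single closed-form string head + text.replace('\n', sep) + tail (unknown language gives ''), instead of A's per-branch list building, per-line mapping and '\n'.join.
import Mathlib
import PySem

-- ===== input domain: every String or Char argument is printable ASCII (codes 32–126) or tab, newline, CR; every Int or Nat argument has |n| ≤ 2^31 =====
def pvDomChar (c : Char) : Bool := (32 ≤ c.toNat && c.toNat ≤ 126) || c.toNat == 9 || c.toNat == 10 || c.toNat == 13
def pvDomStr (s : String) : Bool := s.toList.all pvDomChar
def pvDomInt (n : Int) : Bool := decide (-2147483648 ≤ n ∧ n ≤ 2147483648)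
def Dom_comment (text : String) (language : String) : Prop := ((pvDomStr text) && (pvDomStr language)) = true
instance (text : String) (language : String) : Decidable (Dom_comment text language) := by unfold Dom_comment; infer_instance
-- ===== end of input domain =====

-- B never splits the text into lines: each language is a (head, sep, tail) template and the answer is head ++ text.replace("\n", sep) ++ tail (unknown language -> ""), instead of A's per-branch list building and join (alternative decomposition; same cost).


-- ===== PORT A =====
def comment (text : String) (language : String) : String :=
  let lines := (PySem.Str.split? text "\n").getD []
  let formatted_lines : List String :=
    if language == "Bash" then lines.map (fun line => "# " ++ line)
    else if language == "Bash Multiline" then [": \""] ++ lines ++ ["\""]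
    else if language == "Python" then lines.map (fun line => "# " ++ line)
    else if language == "Python Multiline" then ["\"\"\""] ++ lines ++ ["\"\"\""]
    else if language == "Javascript" then lines.map (fun line => "// " ++ line)
    else if language == "Javascript Multiline" then ["/*"] ++ lines ++ ["*/"]
    else if language == "SQL" then lines.map (fun line => "-- " ++ line)
    else if language == "JavaDoc" then ["/**"] ++ lines.map (fun line => "* " ++ line) ++ ["*/"]
    else if language == "SGML" then lines.map (fun line => "<!-- " ++ line ++ " -->")
    else []
  PySem.Str.join "\n" formatted_lines

-- ===== PORT B =====
-- B: each language is a (head, sep, tail) template; the answer is the closed form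
-- head ++ text.replace("\n", sep) ++ tail — the text is never split into lines.
def templates : PySem.Dict String (String × String × String) :=
  PySem.Dict.mk
    [ ("Bash", ("# ", "\n# ", "")),
      ("Python", ("# ", "\n# ", "")),
      ("Javascript", ("// ", "\n// ", "")),
      ("SQL", ("-- ", "\n-- ", "")),
      ("Bash Multiline", (": \"\n", "\n", "\n\"")),
      ("Python Multiline", ("\"\"\"\n", "\n", "\n\"\"\"")),
      ("Javascript Multiline", ("/*\n", "\n", "\n*/")),
      ("JavaDoc", ("/**\n* ", "\n* ", "\n*/")),
      ("SGML", ("<!-- ", " -->\n<!-- ", " -->")) ]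

def comment_alt (text : String) (language : String) : String :=
  match templates.get? language with
  | none => ""
  | some (head, sep, tail) => head ++ PySem.Str.replace text "\n" sep ++ tail

-- ===== PRECONDITION & SPEC =====
def Spec_comment (text : String) (language : String) (out : String) : Prop := out = comment_alt text language
instance (text : String) (language : String) (out : String) : Decidable (Spec_comment text language out) := by unfold Spec_comment; infer_instance

-- ===== CLAIM (what is proved, stated in full; the proofs are below) =====
def Claim_equal_comment : Prop := ∀ (text : String) (language : String), Dom_comment text language → Spec_comment text language (comment text language)

-- ===== LEMMAS AND PROOFS =====

-- Step equations for the fuelled loops of PySem.Chars.replace / PySem.Chars.splitOn.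
theorem repGo_zero (old new l acc : List Char) :
    PySem.Chars.replace.go old new 0 l acc = acc.reverse ++ l := by
  rw [PySem.Chars.replace.go]

theorem repGo_nil (old new : List Char) (f : Nat) (acc : List Char) :
    PySem.Chars.replace.go old new (f+1) [] acc = acc.reverse := by
  rw [PySem.Chars.replace.go]
  omega

theorem repGo_cons (old new : List Char) (f : Nat) (c : Char) (t acc : List Char) :
    PySem.Chars.replace.go old new (f+1) (c :: t) acc =
      if old.isPrefixOf (c :: t) then
        PySem.Chars.replace.go old new f (List.drop old.length (c :: t)) (new.reverse ++ acc)
      else PySem.Chars.replace.go old new f t (c :: acc) := by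
  rw [PySem.Chars.replace.go]

theorem splitGo_zero (sep : List Char) (l cur : List Char) (acc : List (List Char)) :
    PySem.Chars.splitOn.go sep 0 l cur acc = ((cur.reverse ++ l) :: acc).reverse := by
  rw [PySem.Chars.splitOn.go]

theorem splitGo_nil (sep : List Char) (f : Nat) (cur : List Char) (acc : List (List Char)) :
    PySem.Chars.splitOn.go sep (f+1) [] cur acc = (cur.reverse :: acc).reverse := by
  rw [PySem.Chars.splitOn.go]
  omega

theorem splitGo_cons (sep : List Char) (f : Nat) (c : Char) (t cur : List Char) (acc : List (List Char)) :
    PySem.Chars.splitOn.go sep (f+1) (c :: t) cur acc =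
      if sep.isPrefixOf (c :: t) then
        PySem.Chars.splitOn.go sep f (List.drop sep.length (c :: t)) [] (cur.reverse :: acc)
      else PySem.Chars.splitOn.go sep f t (c :: cur) acc := by
  rw [PySem.Chars.splitOn.go]

-- The accumulators only prepend already-finished output.
theorem repGo_acc (old new : List Char) (fuel : Nat) : ∀ (l acc : List Char),
    PySem.Chars.replace.go old new fuel l acc = acc.reverse ++ PySem.Chars.replace.go old new fuel l [] := by
  induction fuel with
  | zero => intro l acc; simp [repGo_zero]
  | succ f ih =>
    intro l acc
    cases l with
    | nil => simp [repGo_nil]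
    | cons c t =>
      rw [repGo_cons, repGo_cons]
      split
      · rw [ih _ (new.reverse ++ acc), ih _ (new.reverse ++ [])]; simp
      · rw [ih _ (c :: acc), ih _ [c]]; simp

theorem splitGo_acc (sep : List Char) (fuel : Nat) : ∀ (l cur : List Char) (acc : List (List Char)),
    PySem.Chars.splitOn.go sep fuel l cur acc = acc.reverse ++ PySem.Chars.splitOn.go sep fuel l cur [] := by
  induction fuel with
  | zero => intro l cur acc; simp [splitGo_zero]
  | succ f ih =>
    intro l cur acc
    cases l with
    | nil => simp [splitGo_nil]
    | cons c t =>
      rw [splitGo_cons, splitGo_cons]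
      split
      · rw [ih _ _ (cur.reverse :: acc), ih _ _ [cur.reverse]]; simp
      · rw [ih t (c :: cur) acc]

theorem splitGo_ne_nil (sep : List Char) (fuel : Nat) : ∀ (l cur : List Char) (acc : List (List Char)),
    PySem.Chars.splitOn.go sep fuel l cur acc ≠ [] := by
  induction fuel with
  | zero => intro l cur acc; simp [splitGo_zero]
  | succ f ih =>
    intro l cur acc
    cases l with
    | nil => simp [splitGo_nil]
    | cons c t =>
      rw [splitGo_cons]
      split
      · exact ih _ _ _
      · exact ih _ _ _

-- The pending current-piece buffer only extends the head of the eventual output.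
theorem splitGo_cur (sep : List Char) (fuel : Nat) : ∀ (l cur : List Char),
    PySem.Chars.splitOn.go sep fuel l cur [] =
      (PySem.Chars.splitOn.go sep fuel l [] []).modifyHead (cur.reverse ++ ·) := by
  induction fuel with
  | zero => intro l cur; simp [splitGo_zero]
  | succ f ih =>
    intro l cur
    cases l with
    | nil => simp [splitGo_nil]
    | cons c t =>
      rw [splitGo_cons, splitGo_cons]
      split
      · rw [splitGo_acc _ _ _ _ [cur.reverse], splitGo_acc _ _ _ _ [List.reverse []]]
        cases h : PySem.Chars.splitOn.go sep f (List.drop sep.length (c :: t)) [] [] with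
        | nil => exact absurd h (splitGo_ne_nil _ _ _ _ _)
        | cons p ps => simp
      · rw [ih t (c :: cur), ih t [c]]
        cases h : PySem.Chars.splitOn.go sep f t [] [] with
        | nil => exact absurd h (splitGo_ne_nil _ _ _ _ _)
        | cons p ps => simp

theorem join_cons_head (new p : List Char) (c : Char) (ps : List (List Char)) :
    PySem.Chars.join new ((c :: p) :: ps) = c :: PySem.Chars.join new (p :: ps) := by
  cases ps with
  | nil => simp [PySem.Chars.join_singleton]
  | cons q qs => simp [PySem.Chars.join_cons_cons]

-- Core bridge: joining the split pieces with `new` IS replacing `old` by `new`.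
theorem join_splitGo_eq_repGo (old new : List Char) (hold : old ≠ []) (fuel : Nat) : ∀ (l : List Char),
    l.length ≤ fuel →
    PySem.Chars.join new (PySem.Chars.splitOn.go old (fuel+1) l [] []) =
      PySem.Chars.replace.go old new fuel l [] := by
  induction fuel with
  | zero =>
    intro l hl
    have : l = [] := List.eq_nil_of_length_eq_zero (Nat.le_zero.mp hl)
    subst this
    simp [splitGo_nil, repGo_zero, PySem.Chars.join_singleton]
  | succ f ih =>
    intro l hl
    cases l with
    | nil => simp [splitGo_nil, repGo_nil, PySem.Chars.join_singleton]
    | cons c t =>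
      rw [splitGo_cons, repGo_cons]
      split
      · rename_i hpre
        have hlen : 1 ≤ old.length := Nat.one_le_iff_ne_zero.mpr (by simpa using hold)
        have hdrop : (List.drop old.length (c :: t)).length ≤ f := by
          simp only [List.length_drop, List.length_cons]
          simp only [List.length_cons] at hl
          omega
        rw [splitGo_acc _ _ _ _ [List.reverse []], repGo_acc]
        cases h : PySem.Chars.splitOn.go old (f+1) (List.drop old.length (c :: t)) [] [] with
        | nil => exact absurd h (splitGo_ne_nil _ _ _ _ _)
        | cons p ps =>
          have := ih (List.drop old.length (c :: t)) hdrop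
          rw [h] at this
          simp [PySem.Chars.join_cons_cons, this]
      · have ht : t.length ≤ f := by simp only [List.length_cons] at hl; omega
        rw [splitGo_cur, repGo_acc]
        cases h : PySem.Chars.splitOn.go old (f+1) t [] [] with
        | nil => exact absurd h (splitGo_ne_nil _ _ _ _ _)
        | cons p ps =>
          have := ih t ht
          rw [h] at this
          simp [join_cons_head, this]

theorem join_splitOn_eq_replace (s old new : List Char) (h : old ≠ []) :
    PySem.Chars.join new (PySem.Chars.splitOn s old) = PySem.Chars.replace s old new := by
  rw [PySem.Chars.splitOn, PySem.Chars.replace]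
  rw [if_neg (by simpa using h)]
  exact join_splitGo_eq_repGo old new h s.length s le_rfl

theorem splitOn_ne_nil (s sep : List Char) : PySem.Chars.splitOn s sep ≠ [] := by
  rw [PySem.Chars.splitOn]; exact splitGo_ne_nil _ _ _ _ _

-- Shifting a common per-line prefix / wrapper into the separator.
theorem join_map_prefix (p sep : List Char) : ∀ (parts : List (List Char)), parts ≠ [] →
    PySem.Chars.join sep (parts.map (fun l => p ++ l)) = p ++ PySem.Chars.join (sep ++ p) parts := by
  intro parts
  induction parts with
  | nil => intro h; exact absurd rfl h
  | cons x rest ih =>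
    intro _
    cases rest with
    | nil => simp [PySem.Chars.join_singleton]
    | cons y ys =>
      have := ih (by simp)
      simp only [List.map_cons] at this ⊢
      rw [PySem.Chars.join_cons_cons, PySem.Chars.join_cons_cons, this]
      simp [List.append_assoc]

theorem join_map_wrapline (pre post sep : List Char) : ∀ (parts : List (List Char)), parts ≠ [] →
    PySem.Chars.join sep (parts.map (fun l => pre ++ l ++ post)) =
      pre ++ PySem.Chars.join (post ++ sep ++ pre) parts ++ post := by
  intro parts
  induction parts with
  | nil => intro h; exact absurd rfl h
  | cons x rest ih =>
    intro _
    cases rest with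
    | nil => simp [PySem.Chars.join_singleton]
    | cons y ys =>
      have := ih (by simp)
      simp only [List.map_cons] at this ⊢
      rw [PySem.Chars.join_cons_cons, PySem.Chars.join_cons_cons, this]
      simp [List.append_assoc]

theorem join_cons_of_ne_nil (sep o : List Char) (rest : List (List Char)) (h : rest ≠ []) :
    PySem.Chars.join sep (o :: rest) = o ++ sep ++ PySem.Chars.join sep rest := by
  cases rest with
  | nil => exact absurd rfl h
  | cons y ys => rw [PySem.Chars.join_cons_cons]

theorem join_append_singleton (sep c : List Char) : ∀ (parts : List (List Char)), parts ≠ [] →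
    PySem.Chars.join sep (parts ++ [c]) = PySem.Chars.join sep parts ++ sep ++ c := by
  intro parts
  induction parts with
  | nil => intro h; exact absurd rfl h
  | cons x rest ih =>
    intro _
    cases rest with
    | nil => simp [PySem.Chars.join_singleton, PySem.Chars.join_cons_cons]
    | cons y ys =>
      have := ih (by simp)
      simp only [List.cons_append] at this ⊢
      rw [PySem.Chars.join_cons_cons, PySem.Chars.join_cons_cons, this]
      simp [List.append_assoc]

-- String-level forms of A's four branch shapes, each rewritten to B's closed form.
theorem str_prefix (p text : String) :
    PySem.Str.join "\n" (((PySem.Str.split? text "\n").getD []).map (fun line => p ++ line)) =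
      p ++ PySem.Str.replace text "\n" ("\n" ++ p) := by
  rw [← String.toList_inj]
  simp only [PySem.Str.split?, PySem.Chars.split?, PySem.Str.join, PySem.Str.replace,
    String.toList_append]
  simp [List.map_map]
  have hc : (String.toList ∘ (fun line => p ++ line) ∘ String.ofList) = fun l => p.toList ++ l := by
    funext l; simp
  rw [hc, join_map_prefix _ _ _ (splitOn_ne_nil _ _)]
  rw [join_splitOn_eq_replace _ _ _ (by simp)]
  simp

theorem str_wrap (o c text : String) :
    PySem.Str.join "\n" (o :: ((PySem.Str.split? text "\n").getD [] ++ [c])) =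
      (o ++ "\n") ++ PySem.Str.replace text "\n" "\n" ++ ("\n" ++ c) := by
  rw [← String.toList_inj]
  simp only [PySem.Str.split?, PySem.Chars.split?, PySem.Str.join, PySem.Str.replace,
    String.toList_append]
  simp [List.map_map]
  simp only [Function.comp_def, String.toList_ofList, List.map_id']
  rw [join_cons_of_ne_nil _ _ _ (by simp),
      join_append_singleton _ _ _ (splitOn_ne_nil _ _),
      join_splitOn_eq_replace _ _ _ (by simp)]
  simp

theorem str_sgml (pre post text : String) :
    PySem.Str.join "\n" (((PySem.Str.split? text "\n").getD []).map
        (fun line => pre ++ line ++ post)) =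
      pre ++ PySem.Str.replace text "\n" (post ++ "\n" ++ pre) ++ post := by
  rw [← String.toList_inj]
  simp only [PySem.Str.split?, PySem.Chars.split?, PySem.Str.join, PySem.Str.replace,
    String.toList_append]
  simp [List.map_map]
  have hc : (String.toList ∘ (fun line => pre ++ line ++ post) ∘ String.ofList) =
      fun l => pre.toList ++ l ++ post.toList := by
    funext l; simp
  rw [hc, join_map_wrapline _ _ _ _ (splitOn_ne_nil _ _),
      join_splitOn_eq_replace _ _ _ (by simp)]
  simp

theorem str_javadoc (o p c text : String) :
    PySem.Str.join "\n" (o :: (((PySem.Str.split? text "\n").getD []).map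
        (fun line => p ++ line) ++ [c])) =
      (o ++ "\n" ++ p) ++ PySem.Str.replace text "\n" ("\n" ++ p) ++ ("\n" ++ c) := by
  rw [← String.toList_inj]
  simp only [PySem.Str.split?, PySem.Chars.split?, PySem.Str.join, PySem.Str.replace,
    String.toList_append]
  simp [List.map_map]
  have hc : (String.toList ∘ (fun line => p ++ line) ∘ String.ofList) =
      fun l => p.toList ++ l := by
    funext l; simp
  rw [hc, join_cons_of_ne_nil _ _ _ (by simp [splitOn_ne_nil]),
      join_append_singleton _ _ _ (by simp [splitOn_ne_nil]),
      join_map_prefix _ _ _ (splitOn_ne_nil _ _),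
      join_splitOn_eq_replace _ _ _ (by simp)]
  simp

-- ===== VERDICT (by name: the statement is the Claim_ definition above) =====
theorem comment_spec : Claim_equal_comment := by
  intro text language _
  unfold Spec_comment comment comment_alt templates
  by_cases h1 : language = "Bash" <;>
  by_cases h2 : language = "Bash Multiline" <;>
  by_cases h3 : language = "Python" <;>
  by_cases h4 : language = "Python Multiline" <;>
  by_cases h5 : language = "Javascript" <;>
  by_cases h6 : language = "Javascript Multiline" <;>
  by_cases h7 : language = "SQL" <;>
  by_cases h8 : language = "JavaDoc" <;>
  by_cases h9 : language = "SGML" <;>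
  simp_all [PySem.Dict.get?, List.find?]
  · rw [show ("\n# " : String) = "\n" ++ "# " by decide]; exact str_prefix "# " text
  · rw [show (": \"\n" : String) = ": \"" ++ "\n" by decide,
        show ("\n\"" : String) = "\n" ++ "\"" by decide]
    exact str_wrap ": \"" "\"" text
  · rw [show ("\n# " : String) = "\n" ++ "# " by decide]; exact str_prefix "# " text
  · rw [show ("\"\"\"\n" : String) = "\"\"\"" ++ "\n" by decide,
        show ("\n\"\"\"" : String) = "\n" ++ "\"\"\"" by decide]
    exact str_wrap "\"\"\"" "\"\"\"" text
  · rw [show ("\n// " : String) = "\n" ++ "// " by decide]; exact str_prefix "// " text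
  · rw [show ("/*\n" : String) = "/*" ++ "\n" by decide,
        show ("\n*/" : String) = "\n" ++ "*/" by decide]
    exact str_wrap "/*" "*/" text
  · rw [show ("\n-- " : String) = "\n" ++ "-- " by decide]; exact str_prefix "-- " text
  · rw [show ("/**\n* " : String) = "/**" ++ "\n" ++ "* " by decide,
        show ("\n* " : String) = "\n" ++ "* " by decide,
        show ("\n*/" : String) = "\n" ++ "*/" by decide]
    exact str_javadoc "/**" "* " "*/" text
  · rw [show (" -->\n<!-- " : String) = " -->" ++ "\n" ++ "<!-- " by decide]
    exact str_sgml "<!-- " " -->" text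
  · have e1 : ("Bash" == language) = false := by simp only [beq_eq_false_iff_ne]; exact fun e => h1 e.symm
    have e2 : ("Bash Multiline" == language) = false := by simp only [beq_eq_false_iff_ne]; exact fun e => h2 e.symm
    have e3 : ("Python" == language) = false := by simp only [beq_eq_false_iff_ne]; exact fun e => h3 e.symm
    have e4 : ("Python Multiline" == language) = false := by simp only [beq_eq_false_iff_ne]; exact fun e => h4 e.symm
    have e5 : ("Javascript" == language) = false := by simp only [beq_eq_false_iff_ne]; exact fun e => h5 e.symm
    have e6 : ("Javascript Multiline" == language) = false := by simp only [beq_eq_false_iff_ne]; exact fun e => h6 e.symm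
    have e7 : ("SQL" == language) = false := by simp only [beq_eq_false_iff_ne]; exact fun e => h7 e.symm
    have e8 : ("JavaDoc" == language) = false := by simp only [beq_eq_false_iff_ne]; exact fun e => h8 e.symm
    have e9 : ("SGML" == language) = false := by simp only [beq_eq_false_iff_ne]; exact fun e => h9 e.symm
    simp [e1, e2, e3, e4, e5, e6, e7, e8, e9, PySem.Str.join, PySem.Chars.join, List.intercalate]
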